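-- pv_equiv track=rewrite | github.com/chelyuk/Encryption_test_task | src/validator/validate_english_text.py | next
-- ===== SOURCE A (Python) =====
-- import string
--
-- ALLOWED_CHARACTERS = string.ascii_lowercase
--
-- NUMBER_OF_CHARACTERS = len(ALLOWED_CHARACTERS)
--
-- def characterToIndex(char):
--     return ALLOWED_CHARACTERS.index(char)
--
-- def indexToCharacter(index):
--     if NUMBER_OF_CHARACTERS <= index:
--         raise ValueError("Index out of range.")
--     else:
--         return ALLOWED_CHARACTERS[index]
--
-- def next(key, key_size):
--     if len(key) <= 0:
--         for _ in range(key_size):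
--             key.append(indexToCharacter(0))
--     else:
--         key[0] = indexToCharacter((characterToIndex(key[0]) + 1) % NUMBER_OF_CHARACTERS)
--         if characterToIndex(key[0]) == 0:
--             return list(key[0]) + next(key[1:], key_size)
--     return key
-- ===== SOURCE B (Python) =====
-- import string
--
-- ALLOWED_CHARACTERS = string.ascii_lowercase
--
-- NUMBER_OF_CHARACTERS = len(ALLOWED_CHARACTERS)
--
--
-- def next(key, key_size):
--     # Iterative carry loop (no recursion). Equivalence is about the RETURN value:
--     # unlike A, this does not mutate the caller's list.
--     if len(key) == 0:
--         return [ALLOWED_CHARACTERS[0]] * key_size if key_size > 0 else []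
--     result = []
--     tail = key
--     while True:
--         c = ALLOWED_CHARACTERS[(ALLOWED_CHARACTERS.index(tail[0]) + 1) % NUMBER_OF_CHARACTERS]
--         if c != ALLOWED_CHARACTERS[0]:
--             return result + [c] + tail[1:]
--         result.append(c)
--         tail = tail[1:]
--         if not tail:
--             return result + [ALLOWED_CHARACTERS[0]] * key_size
-- ===== Notes on version B (the rewrite author's own statement) =====
-- stated objective: simpler
-- what changed: Replaces A's recursion (which rebuilds the carry prefix via list(key[0]) + recursive call) with a single iterative carry loop that accumulates the wrapped 'a's in a result list and stops at the first non-wrapping position; return values are identical, but B does not mutate the caller's list (A overwrites key[0] / appends in place).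
import Mathlib
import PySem

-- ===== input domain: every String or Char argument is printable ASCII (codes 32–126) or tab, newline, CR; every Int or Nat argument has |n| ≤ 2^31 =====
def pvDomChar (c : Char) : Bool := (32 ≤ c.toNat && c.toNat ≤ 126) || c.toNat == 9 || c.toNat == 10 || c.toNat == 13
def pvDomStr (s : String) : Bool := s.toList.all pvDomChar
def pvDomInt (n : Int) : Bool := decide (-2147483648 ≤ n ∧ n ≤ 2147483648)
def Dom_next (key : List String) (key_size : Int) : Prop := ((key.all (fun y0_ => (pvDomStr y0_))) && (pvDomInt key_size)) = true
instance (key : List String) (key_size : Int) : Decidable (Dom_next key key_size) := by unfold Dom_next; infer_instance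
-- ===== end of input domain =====

-- B replaces A's recursive carry with an iterative carry loop; equivalence is about the RETURN value
-- (A mutates key[0] / appends in place, B does not mutate the argument).


-- ===== PORT A =====
def pvAllowed : String := "abcdefghijklmnopqrstuvwxyz"

-- ALLOWED_CHARACTERS.index(char): Python str.index raises ValueError where find = -1;
-- those inputs are excluded by Pre_next, so -1 marks the raising case
def characterToIndex (char : String) : Int := PySem.Str.find pvAllowed char

-- ALLOWED_CHARACTERS[index]: raises (pyGet? = none) for out-of-range index; Pre_next excludes that
def indexToCharacter (index : Int) : String :=
  match PySem.Str.pyGet? pvAllowed index with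
  | some ch => String.ofList [ch]
  | none => ""

def next (key : List String) (key_size : Int) : List String :=
  match key with
  | [] =>
      -- for _ in range(key_size): key.append(indexToCharacter(0))
      List.replicate key_size.toNat (indexToCharacter 0)
  | k0 :: rest =>
      -- key[0] = indexToCharacter((characterToIndex(key[0]) + 1) % NUMBER_OF_CHARACTERS)
      let k0' := indexToCharacter (PySem.Int.mod (characterToIndex k0 + 1) 26)
      if characterToIndex k0' = 0 then
        -- list(key[0]) + next(key[1:], key_size)
        (k0'.toList.map (fun c => String.ofList [c])) ++ next rest key_size
      else
        k0' :: rest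

-- ===== PORT B =====
-- ALLOWED_CHARACTERS[i] as B accesses it directly
def altCharAt (i : Int) : String :=
  match PySem.Str.pyGet? pvAllowed i with
  | some ch => String.ofList [ch]
  | none => ""

-- the while-loop of B: state = (tail, result)
def next_altLoop : List String → Int → List String → List String
  | [], key_size, result => result ++ List.replicate key_size.toNat (altCharAt 0)
  | t0 :: rest, key_size, result =>
      let c := altCharAt (PySem.Int.mod (PySem.Str.find pvAllowed t0 + 1) 26)
      if c ≠ altCharAt 0 then result ++ [c] ++ rest
      else next_altLoop rest key_size (result ++ [c])

def next_alt (key : List String) (key_size : Int) : List String :=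
  match key with
  | [] => if key_size > 0 then List.replicate key_size.toNat (altCharAt 0) else []
  | _ :: _ => next_altLoop key key_size []

-- ===== PRECONDITION & SPEC =====
-- Pre_next excludes exactly the inputs on which A raises ValueError: A reads key elements while
-- they keep wrapping (index 25, i.e. "z"); it raises iff the first element whose index is not 25
-- is not a substring of the lowercase alphabet (str.index fails, find = -1).
def Pre_next (key : List String) (key_size : Int) : Prop :=
  ((key.find? (fun s => PySem.Str.find pvAllowed s != 25)).all
    (fun s => PySem.Str.find pvAllowed s != -1)) = true
instance (key : List String) (key_size : Int) : Decidable (Pre_next key key_size) := by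
  unfold Pre_next; infer_instance

def pvWitness_next : List String × Int := (["z", "c"], 3)

def Spec_next (key : List String) (key_size : Int) (out : List String) : Prop := out = next_alt key key_size
instance (key : List String) (key_size : Int) (out : List String) : Decidable (Spec_next key key_size out) := by unfold Spec_next; infer_instance

-- ===== CLAIM (what is proved, stated in full; the proofs are below) =====
def Claim_equal_next : Prop := ∀ (key : List String) (key_size : Int), Dom_next key key_size → Pre_next key key_size → Spec_next key key_size (next key key_size)

-- ===== LEMMAS AND PROOFS =====

lemma altCharAt_eq_indexToCharacter (i : Int) : altCharAt i = indexToCharacter i := rfl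


lemma characterToIndex_indexToCharacter (i : Int) (h0 : 0 ≤ i) (h26 : i < 26) :
    characterToIndex (indexToCharacter i) = i := by
  interval_cases i <;> decide

lemma toList_indexToCharacter (i : Int) (h0 : 0 ≤ i) (h26 : i < 26) :
    (indexToCharacter i).toList.map (fun c => String.ofList [c]) = [indexToCharacter i] := by
  interval_cases i <;> decide

lemma find_le_25 (s : String) : PySem.Str.find pvAllowed s ≤ 25 := by
  rw [PySem.Str.find_eq]
  have hle : PySem.Chars.find pvAllowed.toList s.toList ≤ 26 := by
    simpa using PySem.Chars.find_le_length pvAllowed.toList s.toList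
  by_contra hgt
  push Not at hgt
  have h26 : PySem.Chars.find pvAllowed.toList s.toList = 26 := by omega
  have hspec := (PySem.Chars.find_spec (s := pvAllowed.toList) (sub := s.toList) (by omega)).1
  rw [h26] at hspec
  have hnil : s.toList = [] := by
    have : pvAllowed.toList.drop (Int.toNat 26) = [] := by decide
    rw [this] at hspec
    exact List.prefix_nil.mp hspec
  rw [hnil, PySem.Chars.find_nil] at h26
  omega

lemma loop_eq (tail : List String) :
    ∀ (ks : Int) (acc : List String), Pre_next tail ks →
      next_altLoop tail ks acc = acc ++ next tail ks := by
  induction tail with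
  | nil =>
      intro ks acc _
      simp [next_altLoop, next, altCharAt_eq_indexToCharacter]
  | cons t0 rest ih =>
      intro ks acc hpre
      by_cases h25 : PySem.Str.find pvAllowed t0 = 25
      · -- t0 wraps: both programs carry
        have hmod : PySem.Int.mod (PySem.Str.find pvAllowed t0 + 1) 26 = 0 := by
          rw [h25]; decide
        have hpre' : Pre_next rest ks := by
          unfold Pre_next at hpre ⊢
          rwa [List.find?_cons_of_neg (by simp only [bne_iff_ne, ne_eq, not_not]; exact h25)] at hpre
        have hA : next (t0 :: rest) ks = [indexToCharacter 0] ++ next rest ks := by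
          show (if characterToIndex (indexToCharacter (PySem.Int.mod (characterToIndex t0 + 1) 26)) = 0 then _ else _) = _
          rw [show characterToIndex t0 = PySem.Str.find pvAllowed t0 from rfl, hmod]
          rw [characterToIndex_indexToCharacter 0 (by omega) (by omega)]
          simp [toList_indexToCharacter 0 (by omega) (by omega)]
        have hB : next_altLoop (t0 :: rest) ks acc
            = next_altLoop rest ks (acc ++ [altCharAt 0]) := by
          show (if altCharAt (PySem.Int.mod (PySem.Str.find pvAllowed t0 + 1) 26) ≠ altCharAt 0
                then _ else _) = _
          rw [hmod]
          simp
        rw [hB, ih ks _ hpre', hA, altCharAt_eq_indexToCharacter]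
        simp
      · -- t0 does not wrap: both programs stop here
        have hfound : List.find? (fun s => PySem.Str.find pvAllowed s != 25) (t0 :: rest)
            = some t0 := List.find?_cons_of_pos (by simp only [bne_iff_ne, ne_eq]; exact h25)
        have hne1 : PySem.Str.find pvAllowed t0 ≠ -1 := by
          unfold Pre_next at hpre
          rw [hfound] at hpre
          simpa using hpre
        have hge : -1 ≤ PySem.Str.find pvAllowed t0 := by
          rw [PySem.Str.find_eq]; exact PySem.Chars.neg_one_le_find _ _
        have hle := find_le_25 t0
        set f := PySem.Str.find pvAllowed t0 with hf
        have hmod : PySem.Int.mod (f + 1) 26 = f + 1 := by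
          rw [PySem.Int.mod_eq_emod_of_pos (by omega)]
          exact Int.emod_eq_of_lt (by omega) (by omega)
        have hidx : characterToIndex (indexToCharacter (f + 1)) = f + 1 :=
          characterToIndex_indexToCharacter _ (by omega) (by omega)
        have hA : next (t0 :: rest) ks = indexToCharacter (f + 1) :: rest := by
          show (if characterToIndex (indexToCharacter (PySem.Int.mod (characterToIndex t0 + 1) 26)) = 0 then _ else _) = _
          rw [show characterToIndex t0 = f from rfl, hmod, hidx]
          rw [if_neg (by omega)]
        have hcne : altCharAt (f + 1) ≠ altCharAt 0 := by
          rw [altCharAt_eq_indexToCharacter, altCharAt_eq_indexToCharacter]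
          intro h
          have := hidx
          rw [h, characterToIndex_indexToCharacter 0 (by omega) (by omega)] at this
          omega
        have hB : next_altLoop (t0 :: rest) ks acc = acc ++ [altCharAt (f + 1)] ++ rest := by
          show (if altCharAt (PySem.Int.mod (PySem.Str.find pvAllowed t0 + 1) 26) ≠ altCharAt 0
                then _ else _) = _
          rw [← hf, hmod, if_pos hcne]
        rw [hB, hA, altCharAt_eq_indexToCharacter]
        simp

-- ===== VERDICT (by name: the statement is the Claim_ definition above) =====
theorem next_spec : Claim_equal_next := by
  intro key key_size _ hpre
  unfold Spec_next
  match key with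
  | [] =>
      show next [] key_size = next_alt [] key_size
      by_cases hks : key_size > 0
      · simp [next, next_alt, hks, altCharAt_eq_indexToCharacter]
      · have : key_size.toNat = 0 := by omega
        simp [next, next_alt, hks, this]
  | k0 :: rest =>
      show next (k0 :: rest) key_size = next_altLoop (k0 :: rest) key_size []
      rw [loop_eq (k0 :: rest) key_size [] hpre]
      simp
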